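-- pv_equiv track=rewrite | github.com/summonholmes/em-dna | init_background_motif_counts.py | init_background_motif_counts
-- ===== SOURCE A (Python) =====
-- def init_background_motif_counts(len_list, count_bases, motif):
--     background_actg = {
--         "background_a": count_bases[0],
--         "background_c": count_bases[1],
--         "background_t": count_bases[2],
--         "background_g": count_bases[3]
--     }
--     for i in range(len_list):
--         background_actg["background_a"] -= motif[i].count('A')
--         background_actg["background_c"] -= motif[i].count('C')
--         background_actg["background_t"] -= motif[i].count('T')
--         background_actg["background_g"] -= motif[i].count('G')
--     count_background_bases = [
--         background_actg["background_a"], background_actg["background_c"],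
--         background_actg["background_t"], background_actg["background_g"]
--     ]
--     return count_background_bases
-- ===== SOURCE B (Python) =====
-- def init_background_motif_counts(len_list, count_bases, motif):
--     def tally(lo, hi):
--         # (A, C, T, G) totals over motif[lo:hi], by divide and conquer:
--         # a leaf counts one string in a single if/elif character pass,
--         # inner nodes add the two half-range 4-tuples.
--         if hi - lo <= 0:
--             return (0, 0, 0, 0)
--         if hi - lo == 1:
--             a = c = t = g = 0
--             for ch in motif[lo]:
--                 if ch == 'A':
--                     a += 1
--                 elif ch == 'C':
--                     c += 1
--                 elif ch == 'T':
--                     t += 1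
--                 elif ch == 'G':
--                     g += 1
--             return (a, c, t, g)
--         mid = (lo + hi) // 2
--         a1, c1, t1, g1 = tally(lo, mid)
--         a2, c2, t2, g2 = tally(mid, hi)
--         return (a1 + a2, c1 + c2, t1 + t2, g1 + g2)
--     a, c, t, g = tally(0, len_list)
--     return [count_bases[0] - a, count_bases[1] - c,
--             count_bases[2] - t, count_bases[3] - g]
-- ===== Notes on version B (the rewrite author's own statement) =====
-- stated objective: alternative
-- what changed: A's dict accumulator updated in index order by four substring .count scans per string is replaced by a divide-and-conquer tally: the index range is split recursively, each leaf counts one string in a single if/elif character pass into a 4-tuple, and half-range tuples are summed; the four subtractions happen once at the end.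
import Mathlib
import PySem

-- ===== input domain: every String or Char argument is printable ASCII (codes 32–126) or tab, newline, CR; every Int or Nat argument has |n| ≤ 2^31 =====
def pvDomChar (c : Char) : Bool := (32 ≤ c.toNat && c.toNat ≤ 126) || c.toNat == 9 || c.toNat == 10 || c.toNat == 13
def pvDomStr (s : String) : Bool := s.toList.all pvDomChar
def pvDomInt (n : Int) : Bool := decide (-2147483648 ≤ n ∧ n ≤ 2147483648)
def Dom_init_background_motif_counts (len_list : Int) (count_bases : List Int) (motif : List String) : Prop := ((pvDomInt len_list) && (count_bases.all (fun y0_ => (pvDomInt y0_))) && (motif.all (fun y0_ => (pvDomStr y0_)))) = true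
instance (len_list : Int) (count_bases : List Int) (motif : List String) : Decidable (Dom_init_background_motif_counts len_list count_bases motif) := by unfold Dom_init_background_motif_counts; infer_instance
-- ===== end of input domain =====

-- B replaces A's dict accumulator updated by four substring .count scans per string with a
-- recursive helper returning a 4-tuple of base totals built in one character pass per string.

-- ===== PORT A =====
def init_background_motif_counts (len_list : Int) (count_bases : List Int) (motif : List String) : List Int :=
  let bg : PySem.Dict String Int :=
    ((((PySem.Dict.empty.insert "background_a" (PySem.List.pyGetD count_bases 0 0)).insert
        "background_c" (PySem.List.pyGetD count_bases 1 0)).insert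
        "background_t" (PySem.List.pyGetD count_bases 2 0)).insert
        "background_g" (PySem.List.pyGetD count_bases 3 0))
  let bg := (PySem.List.pyRange 0 len_list 1).foldl (fun d i =>
    let s := PySem.List.pyGetD motif i ""
    let d := d.insert "background_a" (d.getD "background_a" 0 - (PySem.Str.count s "A" : Int))
    let d := d.insert "background_c" (d.getD "background_c" 0 - (PySem.Str.count s "C" : Int))
    let d := d.insert "background_t" (d.getD "background_t" 0 - (PySem.Str.count s "T" : Int))
    d.insert "background_g" (d.getD "background_g" 0 - (PySem.Str.count s "G" : Int))) bg
  [bg.getD "background_a" 0, bg.getD "background_c" 0,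
   bg.getD "background_t" 0, bg.getD "background_g" 0]

-- ===== PORT B =====
-- B's divide-and-conquer tally over motif[lo:hi]: a leaf counts one string in a single
-- if/elif character pass into a 4-tuple; inner nodes add the two half-range tuples.
def tallyB (motif : List String) (lo hi : Int) : Int × Int × Int × Int :=
  if hi - lo ≤ 0 then (0, 0, 0, 0)
  else if hi - lo = 1 then
    (PySem.List.pyGetD motif lo "").toList.foldl
      (fun (p : Int × Int × Int × Int) ch =>
        if ch = 'A' then (p.1 + 1, p.2.1, p.2.2.1, p.2.2.2)
        else if ch = 'C' then (p.1, p.2.1 + 1, p.2.2.1, p.2.2.2)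
        else if ch = 'T' then (p.1, p.2.1, p.2.2.1 + 1, p.2.2.2)
        else if ch = 'G' then (p.1, p.2.1, p.2.2.1, p.2.2.2 + 1)
        else p) (0, 0, 0, 0)
  else
    let mid := PySem.Int.floordiv (lo + hi) 2
    let p := tallyB motif lo mid
    let q := tallyB motif mid hi
    (p.1 + q.1, p.2.1 + q.2.1, p.2.2.1 + q.2.2.1, p.2.2.2 + q.2.2.2)
  termination_by (hi - lo).toNat
  decreasing_by
  all_goals
    simp_wf
    omega

def init_background_motif_counts_alt (len_list : Int) (count_bases : List Int) (motif : List String) : List Int :=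
  let t := tallyB motif 0 len_list
  [PySem.List.pyGetD count_bases 0 0 - t.1,
   PySem.List.pyGetD count_bases 1 0 - t.2.1,
   PySem.List.pyGetD count_bases 2 0 - t.2.2.1,
   PySem.List.pyGetD count_bases 3 0 - t.2.2.2]

-- ===== PRECONDITION & SPEC =====
-- Pre_: exactly where the Python A returns — count_bases has the four indexed entries and
-- every index in range(len_list) is a valid index of motif (else IndexError).
def Pre_init_background_motif_counts (len_list : Int) (count_bases : List Int) (motif : List String) : Prop :=
  4 ≤ count_bases.length ∧ len_list ≤ (motif.length : Int)
instance (len_list : Int) (count_bases : List Int) (motif : List String) : Decidable (Pre_init_background_motif_counts len_list count_bases motif) := by unfold Pre_init_background_motif_counts; infer_instance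

def pvWitness_init_background_motif_counts : Int × List Int × List String := (2, [9, 8, 7, 6], ["ACT", "GGA"])

def Spec_init_background_motif_counts (len_list : Int) (count_bases : List Int) (motif : List String) (out : List Int) : Prop := out = init_background_motif_counts_alt len_list count_bases motif
instance (len_list : Int) (count_bases : List Int) (motif : List String) (out : List Int) : Decidable (Spec_init_background_motif_counts len_list count_bases motif out) := by unfold Spec_init_background_motif_counts; infer_instance

-- ===== CLAIM (what is proved, stated in full; the proofs are below) =====
def Claim_equal_init_background_motif_counts : Prop := ∀ (len_list : Int) (count_bases : List Int) (motif : List String), Dom_init_background_motif_counts len_list count_bases motif → Pre_init_background_motif_counts len_list count_bases motif → Spec_init_background_motif_counts len_list count_bases motif (init_background_motif_counts len_list count_bases motif)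

-- ===== LEMMAS AND PROOFS =====

-- s.count('X') for a single-character needle is the character count of the char list.
lemma chars_count_go_singleton (c : Char) : ∀ (s : List Char) (fuel acc : Nat), s.length ≤ fuel →
    PySem.Chars.count.go [c] fuel s acc = acc + s.count c := by
  intro s
  induction s with
  | nil => intro fuel acc _; cases fuel <;> simp [PySem.Chars.count.go]
  | cons h t ih =>
      intro fuel acc hf
      cases fuel with
      | zero => simp at hf
      | succ n =>
          have ht : t.length ≤ n := by simp at hf; omega
          by_cases hc : c = h
          · subst hc
            rw [show PySem.Chars.count.go [c] (n + 1) (c :: t) acc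
                  = PySem.Chars.count.go [c] n t (acc + 1) from by
                simp [PySem.Chars.count.go, List.isPrefixOf]]
            rw [ih n (acc + 1) ht]
            simp; omega
          · have hbeq : (c == h) = false := by simp [hc]
            rw [show PySem.Chars.count.go [c] (n + 1) (h :: t) acc
                  = PySem.Chars.count.go [c] n t acc from by
                simp [PySem.Chars.count.go, List.isPrefixOf, hbeq]]
            rw [ih n acc ht]
            simp [Ne.symm hc]

lemma chars_count_singleton (cs : List Char) (c : Char) :
    PySem.Chars.count cs [c] = cs.count c := by
  have h : ([c] : List Char).isEmpty = false := rfl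
  simp only [PySem.Chars.count, h, Bool.false_eq_true, if_false]
  simpa using chars_count_go_singleton c cs cs.length 0 le_rfl

-- A-side loop invariant, one lemma per tracked key: each accumulator entry decreases by the
-- per-string substring counts of its base.
lemma a_fold_getD (motif : List String) (key : String) (cnt : String → Int)
    (hstep : ∀ (d : PySem.Dict String Int) (i : Int),
      (let s := PySem.List.pyGetD motif i ""
       let d := d.insert "background_a" (d.getD "background_a" 0 - (PySem.Str.count s "A" : Int))
       let d := d.insert "background_c" (d.getD "background_c" 0 - (PySem.Str.count s "C" : Int))
       let d := d.insert "background_t" (d.getD "background_t" 0 - (PySem.Str.count s "T" : Int))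
       d.insert "background_g" (d.getD "background_g" 0 - (PySem.Str.count s "G" : Int))).getD key 0
      = d.getD key 0 - cnt (PySem.List.pyGetD motif i "")) :
    ∀ (l : List Int) (d : PySem.Dict String Int),
    (l.foldl (fun d i =>
      let s := PySem.List.pyGetD motif i ""
      let d := d.insert "background_a" (d.getD "background_a" 0 - (PySem.Str.count s "A" : Int))
      let d := d.insert "background_c" (d.getD "background_c" 0 - (PySem.Str.count s "C" : Int))
      let d := d.insert "background_t" (d.getD "background_t" 0 - (PySem.Str.count s "T" : Int))
      d.insert "background_g" (d.getD "background_g" 0 - (PySem.Str.count s "G" : Int))) d).getD key 0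
    = d.getD key 0 - ((l.map (fun i => cnt (PySem.List.pyGetD motif i ""))).sum) := by
  intro l
  induction l with
  | nil => intro d; simp
  | cons x t ih =>
      intro d
      simp only [List.foldl_cons, List.map_cons, List.sum_cons]
      rw [ih, hstep]
      ring

-- B-side inner pass: folding the if/elif chain over a char list adds each component's count.
lemma tally_chars (cs : List Char) : ∀ (p : Int × Int × Int × Int),
    cs.foldl (fun (p : Int × Int × Int × Int) ch =>
        if ch = 'A' then (p.1 + 1, p.2.1, p.2.2.1, p.2.2.2)
        else if ch = 'C' then (p.1, p.2.1 + 1, p.2.2.1, p.2.2.2)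
        else if ch = 'T' then (p.1, p.2.1, p.2.2.1 + 1, p.2.2.2)
        else if ch = 'G' then (p.1, p.2.1, p.2.2.1, p.2.2.2 + 1)
        else p) p
    = (p.1 + cs.count 'A', p.2.1 + cs.count 'C', p.2.2.1 + cs.count 'T', p.2.2.2 + cs.count 'G') := by
  induction cs with
  | nil => intro p; simp
  | cons ch t ih =>
      intro p
      simp only [List.foldl_cons]
      rw [ih]
      by_cases hA : ch = 'A'
      · subst hA; simp <;> omega
      · by_cases hC : ch = 'C'
        · subst hC; simp <;> omega
        · by_cases hT : ch = 'T'
          · subst hT; simp [hA, hC] <;> omega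
          · by_cases hG : ch = 'G'
            · subst hG; simp [hA, hC, hT] <;> omega
            · simp [hA, hC, hT, hG]

-- B-side recursion characterised as sums of character counts over range(lo, hi).
lemma tallyB_eq (motif : List String) (lo hi : Int) :
    tallyB motif lo hi
    = (((PySem.List.pyRange lo hi 1).map (fun i => (((PySem.List.pyGetD motif i "").toList.count 'A' : Int)))).sum,
       ((PySem.List.pyRange lo hi 1).map (fun i => (((PySem.List.pyGetD motif i "").toList.count 'C' : Int)))).sum,
       ((PySem.List.pyRange lo hi 1).map (fun i => (((PySem.List.pyGetD motif i "").toList.count 'T' : Int)))).sum,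
       ((PySem.List.pyRange lo hi 1).map (fun i => (((PySem.List.pyGetD motif i "").toList.count 'G' : Int)))).sum) := by
  by_cases h0 : hi - lo ≤ 0
  · rw [tallyB, if_pos h0, PySem.List.pyRange_one_eq_nil (by omega)]
    simp
  · by_cases h1 : hi - lo = 1
    · have hhi : hi = lo + 1 := by omega
      subst hhi
      rw [tallyB]
      simp only [if_neg h0, if_pos h1, PySem.List.pyRange_one_singleton]
      rw [tally_chars]
      simp
    · have hmid := PySem.Int.floordiv_eq_ediv_of_pos (by omega : (0:Int) < 2) (a := lo + hi)
      have hlm : lo ≤ PySem.Int.floordiv (lo + hi) 2 := by rw [hmid]; omega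
      have hmh : PySem.Int.floordiv (lo + hi) 2 ≤ hi := by rw [hmid]; omega
      rw [tallyB]
      simp only [if_neg h0, if_neg h1]
      rw [tallyB_eq motif lo (PySem.Int.floordiv (lo + hi) 2),
          tallyB_eq motif (PySem.Int.floordiv (lo + hi) 2) hi,
          PySem.List.pyRange_one_append lo (PySem.Int.floordiv (lo + hi) 2) hi hlm hmh]
      simp
  termination_by (hi - lo).toNat
  decreasing_by
  all_goals
    simp_wf
    omega

-- ===== VERDICT (by name: the statement is the Claim_ definition above) =====
theorem init_background_motif_counts_spec : Claim_equal_init_background_motif_counts := by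
  intro len_list count_bases motif _ _
  unfold Spec_init_background_motif_counts
  unfold init_background_motif_counts init_background_motif_counts_alt
  simp only []
  rw [a_fold_getD motif "background_a" (fun s => (PySem.Str.count s "A" : Int))
        (by intro d i; simp [PySem.Dict.getD_insert]),
      a_fold_getD motif "background_c" (fun s => (PySem.Str.count s "C" : Int))
        (by intro d i; simp [PySem.Dict.getD_insert]),
      a_fold_getD motif "background_t" (fun s => (PySem.Str.count s "T" : Int))
        (by intro d i; simp [PySem.Dict.getD_insert]),
      a_fold_getD motif "background_g" (fun s => (PySem.Str.count s "G" : Int))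
        (by intro d i; simp [PySem.Dict.getD_insert]),
      tallyB_eq]
  simp [PySem.Dict.getD_insert, chars_count_singleton]
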